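-- pv_equiv track=rewrite | github.com/LilDrugHill/python-project-lvl2 | gendiff/formatters/stylish.py | visual
-- ===== SOURCE A (Python) =====
-- REPLACER = ' '
--
-- SPACE_COUNT = 4
--
-- def visual(value):
--     index = 0
--     while index < len(value):
--
--         if value[index] == ']':
--             seporator_position = value[index + 1]
--             value = value.replace(
--                 f']{seporator_position}',
--                 (f'\n{REPLACER * SPACE_COUNT * int(seporator_position)}' + '}'))
--             index = 0
--             continue
--
--         index += 1
--
--     return to_str(value)
--
-- def to_str(data):
--
--     completed_str = (data
--                      .replace('True', 'true')
--                      .replace('None', 'null')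
--                      .replace('False', 'false')
--                      .replace('[', '{\n')
--                      .replace(', ', '\n')
--                      .replace("'", '')
--                      .replace('"', '')
--                      .replace('\\', '')
--                      .replace('  +', '+ ')
--                      .replace('  -', '- '))
--
--     return completed_str
-- ===== SOURCE B (Python) =====
-- REPLACER = ' '
--
-- SPACE_COUNT = 4
--
-- def visual(value):
--     out = []
--     i = 0
--     n = len(value)
--     while i < n:
--         c = value[i]
--         if c == ']':
--             seporator_position = value[i + 1]
--             out.append('\n' + REPLACER * SPACE_COUNT * int(seporator_position) + '}')
--             i += 2
--         else:
--             out.append(c)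
--             i += 1
--     return to_str(''.join(out))
--
-- def to_str(data):
--
--     completed_str = (data
--                      .replace('True', 'true')
--                      .replace('None', 'null')
--                      .replace('False', 'false')
--                      .replace('[', '{\n')
--                      .replace(', ', '\n')
--                      .replace("'", '')
--                      .replace('"', '')
--                      .replace('\\', '')
--                      .replace('  +', '+ ')
--                      .replace('  -', '- '))
--
--     return completed_str
-- ===== Notes on version B (the rewrite author's own statement) =====
-- stated objective: alternative
-- what changed: Replaced the global replace-and-rescan-from-index-0 while loop by a single left-to-right scan that rewrites each ']d' pair into newline+indent+'}' while appending to a list buffer, joined once and fed to the unchanged to_str.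
import Mathlib
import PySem

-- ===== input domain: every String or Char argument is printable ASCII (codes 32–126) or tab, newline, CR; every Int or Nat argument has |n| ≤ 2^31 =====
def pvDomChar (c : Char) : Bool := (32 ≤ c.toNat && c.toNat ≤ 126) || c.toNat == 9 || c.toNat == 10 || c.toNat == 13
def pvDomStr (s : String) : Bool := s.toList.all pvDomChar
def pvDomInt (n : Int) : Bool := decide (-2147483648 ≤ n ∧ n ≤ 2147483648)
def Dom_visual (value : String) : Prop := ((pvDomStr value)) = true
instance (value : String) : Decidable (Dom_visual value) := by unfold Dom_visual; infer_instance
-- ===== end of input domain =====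

-- B replaces A's global replace-and-restart loop by one left-to-right scan over the string; equivalence is proved on Pre_ (elsewhere A raises).

-- shared helper: the replacement text f'\n{REPLACER * SPACE_COUNT * int(d)}' + '}'  (identical expression in both Pythons)
def rdStr (n : Int) : List Char := '\n' :: (List.replicate (4 * n).toNat ' ' ++ ['}'])

-- shared helper: literal port of to_str (identical in both Pythons)
def toStrPy (data : List Char) : List Char :=
  PySem.Chars.replace (PySem.Chars.replace (PySem.Chars.replace (PySem.Chars.replace
    (PySem.Chars.replace (PySem.Chars.replace (PySem.Chars.replace (PySem.Chars.replace
      (PySem.Chars.replace (PySem.Chars.replace data "True".toList "true".toList)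
        "None".toList "null".toList) "False".toList "false".toList)
        "[".toList "{\n".toList) ", ".toList "\n".toList) "'".toList [])
        "\"".toList []) "\\".toList []) "  +".toList "+ ".toList) "  -".toList "- ".toList

-- proof-side model of str.replace for the two-char pattern [']', d] (needed by visualGo's termination)
def grPair (d : Char) (new : List Char) : List Char → List Char
  | [] => []
  | [c] => [c]
  | c :: x :: t => if c = ']' ∧ x = d then new ++ grPair d new t else c :: grPair d new (x :: t)

theorem grPair_go_eq (d : Char) (new : List Char) :
    ∀ (fuel : Nat) (l acc : List Char), l.length ≤ fuel →
      PySem.Chars.replace.go [']', d] new fuel l acc = acc.reverse ++ grPair d new l := by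
  intro fuel
  induction fuel with
  | zero =>
    intro l acc hl
    have : l = [] := List.eq_nil_of_length_eq_zero (Nat.le_zero.mp hl)
    subst this; simp [PySem.Chars.replace.go, grPair]
  | succ fuel ih =>
    intro l acc hl
    match l with
    | [] => simp [PySem.Chars.replace.go, grPair]
    | [c] =>
      have hpre : List.isPrefixOf [']', d] [c] = false := by
        simp [List.isPrefixOf]
      simp only [PySem.Chars.replace.go, hpre, Bool.false_eq_true, if_false]
      rw [ih [] (c :: acc) (by simp)]
      simp [grPair]
    | c :: x :: t =>
      by_cases hcd : c = ']' ∧ x = d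
      · have hpre : List.isPrefixOf [']', d] (c :: x :: t) = true := by
          simp [List.isPrefixOf, hcd.1, hcd.2]
        simp only [PySem.Chars.replace.go, hpre, if_true]
        rw [ih _ _ (by simp at hl ⊢; omega)]
        simp [grPair, hcd.1, hcd.2]
      · have hpre : List.isPrefixOf [']', d] (c :: x :: t) = false := by
          simp only [List.isPrefixOf, Bool.and_eq_false_iff, beq_eq_false_iff_ne]
          rcases (not_and_or.mp hcd) with h | h
          · left; exact Ne.symm h
          · right; simp; exact Ne.symm h
        simp only [PySem.Chars.replace.go, hpre, Bool.false_eq_true, if_false]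
        rw [ih _ _ (by simp at hl ⊢; omega)]
        simp [grPair, hcd]

theorem replace_pair (s : List Char) (d : Char) (new : List Char) :
    PySem.Chars.replace s [']', d] new = grPair d new s := by
  have h : ([']', d] : List Char).isEmpty = false := by simp
  simp only [PySem.Chars.replace, h, Bool.false_eq_true, if_false]
  exact grPair_go_eq d new s.length s [] (le_refl _)

theorem count_grPair_le (d : Char) (new : List Char) (hn : ']' ∉ new) :
    ∀ s : List Char, (grPair d new s).count ']' ≤ s.count ']' := by
  intro s
  induction s using grPair.induct (d := d) with
  | case1 => simp [grPair]
  | case2 c => simp [grPair]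
  | case3 c x t h ih =>
    rw [show grPair d new (c :: x :: t) = new ++ grPair d new t from by
      simp [grPair, h.1, h.2]]
    rw [List.count_append, List.count_eq_zero.mpr hn, Nat.zero_add]
    calc (grPair d new t).count ']' ≤ t.count ']' := ih
      _ ≤ (c :: x :: t).count ']' := by simp [List.count_cons]; omega
  | case4 c x t h ih =>
    rw [show grPair d new (c :: x :: t) = c :: grPair d new (x :: t) from by
      simp [grPair, h]]
    simp only [List.count_cons] at ih ⊢
    omega

theorem count_grPair_lt (d : Char) (new : List Char) (hn : ']' ∉ new) :
    ∀ s : List Char, [']', d] <:+: s → (grPair d new s).count ']' < s.count ']' := by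
  intro s
  induction s using grPair.induct (d := d) with
  | case1 =>
    intro hocc
    have := hocc.length_le; simp at this
  | case2 c =>
    intro hocc
    have := hocc.length_le; simp at this
  | case3 c x t h ih =>
    intro _
    rw [show grPair d new (c :: x :: t) = new ++ grPair d new t from by
      simp [grPair, h.1, h.2]]
    rw [List.count_append, List.count_eq_zero.mpr hn, Nat.zero_add]
    have hle := count_grPair_le d new hn t
    have hc : c = ']' := h.1
    subst hc
    have : (']' :: x :: t).count ']' = (x :: t).count ']' + 1 := by
      rw [List.count_cons]; simp
    rw [this, List.count_cons]
    have hih := count_grPair_le d new hn t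
    omega
  | case4 c x t h ih =>
    intro hocc
    rcases List.infix_cons_iff.mp hocc with hpre | hinf
    · exfalso
      rcases hpre with ⟨r, hr⟩
      simp only [List.cons_append] at hr
      injection hr with h1 hr'; injection hr' with h2 _
      exact h ⟨h1.symm, h2.symm⟩
    · rw [show grPair d new (c :: x :: t) = c :: grPair d new (x :: t) from by
        simp [grPair, h]]
      have := ih hinf
      simp only [List.count_cons] at this ⊢
      omega

-- ===== PORT A =====
def visualGo (value : List Char) (index : Nat) : List Char :=
  if h : index < value.length then
    if hb : value[index] = ']' then
      match hg : PySem.List.pyGet? value ((index : Int) + 1) with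
      | none => value        -- Python raises IndexError here
      | some sep =>
        match PySem.Int.ofChars? [sep] with
        | none => value      -- Python raises ValueError (int()) here
        | some n =>
          visualGo (PySem.Chars.replace value [']', sep] (rdStr n)) 0
    else
      visualGo value (index + 1)
  else
    value
termination_by (value.count ']', value.length - index)
decreasing_by
  · apply Prod.Lex.left
    have hcast : ((index : Int) + 1) = ((index + 1 : Nat) : Int) := by push_cast; ring
    rw [hcast, PySem.List.pyGet?_natCast] at hg
    have h2 : index + 1 < value.length := by
      by_contra hcon
      rw [List.getElem?_eq_none (by omega)] at hg
      simp at hg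
    have hdrop : value.drop index = ']' :: sep :: value.drop (index + 2) := by
      rw [List.drop_eq_getElem_cons h, hb]
      congr 1
      rw [List.drop_eq_getElem_cons h2]
      rw [List.getElem?_eq_getElem h2] at hg
      simp only [Option.some.injEq] at hg
      rw [hg]
    have hocc : [']', sep] <:+: value := by
      have hpre : [']', sep] <+: value.drop index :=
        ⟨value.drop (index + 2), by rw [hdrop]; rfl⟩
      exact hpre.isInfix.trans (List.drop_suffix index value).isInfix
    rw [replace_pair]
    apply count_grPair_lt _ _ _ _ hocc
    simp [rdStr, List.mem_replicate]
  · apply Prod.Lex.right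
    omega

def visual (value : String) : String := String.mk (toStrPy (visualGo value.toList 0))

-- ===== PORT B =====
def scanB : List Char → List Char
  | [] => []
  | c :: rest =>
    if c = ']' then
      match rest with
      | [] => [c]                       -- Python raises IndexError here
      | x :: rest' =>
        match PySem.Int.ofChars? [x] with
        | none => c :: x :: scanB rest' -- Python raises ValueError (int()) here
        | some n => rdStr n ++ scanB rest'
    else c :: scanB rest

def visual_alt (value : String) : String := String.mk (toStrPy (scanB value.toList))

-- ===== PRECONDITION & SPEC =====
-- Pre_: every ']' is immediately followed by a character int() accepts — exactly the inputs where A (and B) return instead of raising IndexError/ValueError.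
def Pre_visual (value : String) : Prop :=
  ∀ i ∈ List.range value.toList.length,
    value.toList[i]? = some ']' →
      (value.toList[i + 1]?.elim false (fun c => (PySem.Int.ofChars? [c]).isSome)) = true
instance (value : String) : Decidable (Pre_visual value) := by unfold Pre_visual; infer_instance

def pvWitness_visual : String := "[1]0"

def Spec_visual (value : String) (out : String) : Prop := out = visual_alt value
instance (value : String) (out : String) : Decidable (Spec_visual value out) := by unfold Spec_visual; infer_instance

-- ===== CLAIM (what is proved, stated in full; the proofs are below) =====
def Claim_equal_visual : Prop := ∀ (value : String), Dom_visual value → Pre_visual value → Spec_visual value (visual value)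

-- ===== LEMMAS AND PROOFS =====

-- proof-side invariant: the scan-shaped restatement of Pre_
def goodB : List Char → Bool
  | [] => true
  | c :: rest =>
    if c = ']' then
      match rest with
      | [] => false
      | x :: rest' => (PySem.Int.ofChars? [x]).isSome && goodB rest'
    else goodB rest

theorem rdStr_no_bracket (n : Int) : ']' ∉ rdStr n := by
  simp [rdStr, List.mem_replicate]

theorem digit_ne_bracket {x : Char} (h : (PySem.Int.ofChars? [x]).isSome = true) : x ≠ ']' := by
  intro he; subst he; exact absurd h (by decide)

theorem goodB_cons_ne {c : Char} (hc : c ≠ ']') (t : List Char) : goodB (c :: t) = goodB t := by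
  match t with
  | [] => simp [goodB, hc]
  | x :: t' => simp [goodB, hc]

theorem goodB_bracket {x : Char} {t : List Char} :
    goodB (']' :: x :: t) = ((PySem.Int.ofChars? [x]).isSome && goodB t) := by
  simp [goodB]

theorem scanB_cons_ne {c : Char} (hc : c ≠ ']') (t : List Char) : scanB (c :: t) = c :: scanB t := by
  match t with
  | [] => simp [scanB, hc]
  | x :: t' => simp [scanB, hc]

theorem scanB_bracket {x : Char} {t : List Char} {n : Int}
    (hx : PySem.Int.ofChars? [x] = some n) : scanB (']' :: x :: t) = rdStr n ++ scanB t := by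
  simp [scanB, hx]

theorem goodB_tail {c : Char} {t : List Char} (h : goodB (c :: t) = true) : goodB t = true := by
  by_cases hc : c = ']'
  · subst hc
    match t with
    | [] => simp [goodB] at h
    | x :: t' =>
      rw [goodB_bracket, Bool.and_eq_true] at h
      rw [goodB_cons_ne (digit_ne_bracket h.1)]
      exact h.2
  · rwa [goodB_cons_ne hc] at h

theorem goodB_drop {s : List Char} (h : goodB s = true) (i : Nat) : goodB (s.drop i) = true := by
  induction i with
  | zero => simpa using h
  | succ i ih =>
    rw [← List.drop_drop]
    match hd : s.drop i with
    | [] => simp [goodB]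
    | c :: t => exact goodB_tail (hd ▸ ih)

theorem goodB_append_no {u : List Char} (hu : ']' ∉ u) (v : List Char) :
    goodB (u ++ v) = goodB v := by
  induction u with
  | nil => rfl
  | cons c t ih =>
    have hc : c ≠ ']' := fun he => hu (he ▸ List.mem_cons_self ..)
    rw [List.cons_append, goodB_cons_ne hc, ih (fun hm => hu (List.mem_cons_of_mem _ hm))]

theorem scanB_append_no {u : List Char} (hu : ']' ∉ u) (v : List Char) :
    scanB (u ++ v) = u ++ scanB v := by
  induction u with
  | nil => rfl
  | cons c t ih =>
    have hc : c ≠ ']' := fun he => hu (he ▸ List.mem_cons_self ..)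
    rw [List.cons_append, scanB_cons_ne hc, ih (fun hm => hu (List.mem_cons_of_mem _ hm)),
      List.cons_append]

theorem scanB_id {s : List Char} (hs : ']' ∉ s) : scanB s = s := by
  induction s with
  | nil => rfl
  | cons c t ih =>
    have hc : c ≠ ']' := fun he => hs (he ▸ List.mem_cons_self ..)
    rw [scanB_cons_ne hc, ih (fun hm => hs (List.mem_cons_of_mem _ hm))]

theorem grPair_cons_ne {c : Char} (hc : c ≠ ']') (d : Char) (new t : List Char) :
    grPair d new (c :: t) = c :: grPair d new t := by
  match t with
  | [] => simp [grPair]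
  | x :: t' =>
    simp only [grPair]
    rw [if_neg (fun h => hc h.1)]

theorem grPair_pair (d : Char) (new t : List Char) :
    grPair d new (']' :: d :: t) = new ++ grPair d new t := by
  simp [grPair]

theorem goodB_grPair {d : Char} {n : Int} (hd : PySem.Int.ofChars? [d] = some n) :
    ∀ s : List Char, goodB s = true → goodB (grPair d (rdStr n) s) = true := by
  intro s
  induction s using grPair.induct (d := d) with
  | case1 => intro _; simp [grPair, goodB]
  | case2 c => intro h; simpa [grPair] using h
  | case3 c x t hcx ih =>
    intro h
    have hc : c = ']' := hcx.1
    have hx : x = d := hcx.2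
    subst hc; subst hx
    rw [goodB_bracket, Bool.and_eq_true] at h
    rw [grPair_pair, goodB_append_no (rdStr_no_bracket n)]
    exact ih h.2
  | case4 c x t hcx ih =>
    intro h
    simp only [grPair, if_neg hcx]
    by_cases hc : c = ']'
    · subst hc
      rw [goodB_bracket, Bool.and_eq_true] at h
      have hx : x ≠ ']' := digit_ne_bracket h.1
      have ih' := ih (by rw [goodB_cons_ne hx]; exact h.2)
      rw [grPair_cons_ne hx] at ih' ⊢
      rw [goodB_cons_ne hx] at ih'
      rw [goodB_bracket, Bool.and_eq_true]
      exact ⟨h.1, ih'⟩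
    · rw [goodB_cons_ne hc] at h
      rw [goodB_cons_ne hc]
      exact ih h

theorem scanB_grPair {d : Char} {n : Int} (hd : PySem.Int.ofChars? [d] = some n) :
    ∀ s : List Char, goodB s = true → scanB (grPair d (rdStr n) s) = scanB s := by
  intro s
  induction s using grPair.induct (d := d) with
  | case1 => intro _; rfl
  | case2 c => intro _; simp [grPair]
  | case3 c x t hcx ih =>
    intro h
    have hc : c = ']' := hcx.1
    have hx : x = d := hcx.2
    subst hc; subst hx
    rw [goodB_bracket, Bool.and_eq_true] at h
    rw [grPair_pair, scanB_append_no (rdStr_no_bracket n), ih h.2, scanB_bracket hd]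
  | case4 c x t hcx ih =>
    intro h
    simp only [grPair, if_neg hcx]
    by_cases hc : c = ']'
    · subst hc
      rw [goodB_bracket, Bool.and_eq_true] at h
      have hx : x ≠ ']' := digit_ne_bracket h.1
      obtain ⟨m, hm⟩ := Option.isSome_iff_exists.mp h.1
      have ih' := ih (by rw [goodB_cons_ne hx]; exact h.2)
      rw [grPair_cons_ne hx, scanB_cons_ne hx, scanB_cons_ne hx] at ih'
      simp only [List.cons.injEq, true_and] at ih'
      rw [grPair_cons_ne hx, scanB_bracket hm, scanB_bracket hm, ih']
    · rw [goodB_cons_ne hc] at h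
      rw [scanB_cons_ne hc, scanB_cons_ne hc, ih h]

theorem visualGo_no {s : List Char} (hs : ']' ∉ s) :
    ∀ (j index : Nat), s.length - index ≤ j → visualGo s index = s := by
  intro j
  induction j with
  | zero =>
    intro index hj
    rw [visualGo]
    simp only [dif_neg (by omega : ¬ index < s.length)]
  | succ j ih =>
    intro index hj
    by_cases h : index < s.length
    · have hb : ¬ s[index] = ']' := fun he => hs (he ▸ s.getElem_mem h)
      rw [visualGo]
      simp only [dif_pos h, dif_neg hb]
      exact ih (index + 1) (by omega)
    · rw [visualGo]
      simp only [dif_neg h]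

theorem visualGo_eq_scanB :
    ∀ (k : Nat) (s : List Char), goodB s = true → s.count ']' ≤ k →
      ∀ (j index : Nat), s.length - index ≤ j → ']' ∉ s.take index →
        visualGo s index = scanB s := by
  intro k
  induction k with
  | zero =>
    intro s hg hc j index hj ht
    have hs : ']' ∉ s := List.count_eq_zero.mp (Nat.le_zero.mp hc)
    rw [scanB_id hs]
    exact visualGo_no hs j index hj
  | succ k ihk =>
    intro s hg hc j
    induction j with
    | zero =>
      intro index hj ht
      rw [visualGo]
      simp only [dif_neg (by omega : ¬ index < s.length)]
      have heq : s.take index = s := List.take_of_length_le (by omega)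
      rw [scanB_id (heq ▸ ht)]
    | succ j ihj =>
      intro index hj ht
      by_cases h : index < s.length
      · by_cases hb : s[index] = ']'
        · -- the replace branch of A
          have hgood := goodB_drop hg index
          rw [List.drop_eq_getElem_cons h, hb] at hgood
          obtain ⟨x, t, hxt⟩ : ∃ x t, s.drop (index + 1) = x :: t := by
            match hd : s.drop (index + 1) with
            | [] => rw [hd] at hgood; simp [goodB] at hgood
            | x :: t => exact ⟨x, t, rfl⟩
          rw [hxt, goodB_bracket, Bool.and_eq_true] at hgood
          obtain ⟨m, hm⟩ := Option.isSome_iff_exists.mp hgood.1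
          have hx1 : s[index + 1]? = some x := by
            rw [← List.head?_drop, hxt]; rfl
          have hpg : PySem.List.pyGet? s ((index : Int) + 1) = some x := by
            rw [show ((index : Int) + 1) = ((index + 1 : Nat) : Int) by push_cast; ring,
              PySem.List.pyGet?_natCast]
            exact hx1
          rw [visualGo]
          simp only [dif_pos h, dif_pos hb]
          split
          next heq => rw [hpg] at heq; exact absurd heq (by simp)
          next sep heq =>
            rw [hpg] at heq
            injection heq with hsep
            subst hsep
            simp only [hm]
            rw [replace_pair]
            have hdrop : s.drop index = ']' :: x :: t := by
              rw [List.drop_eq_getElem_cons h, hb]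
              congr 1
            have hocc : [']', x] <:+: s := by
              have hpre : [']', x] <+: s.drop index := ⟨t, by rw [hdrop]; rfl⟩
              exact hpre.isInfix.trans (List.drop_suffix index s).isInfix
            have hlt := count_grPair_lt x (rdStr m) (rdStr_no_bracket m) s hocc
            have hgr := goodB_grPair hm s hg
            rw [ihk (grPair x (rdStr m) s) hgr (by omega)
              (grPair x (rdStr m) s).length 0 (by omega) (by simp)]
            exact scanB_grPair hm s hg
        · rw [visualGo]
          simp only [dif_pos h, dif_neg hb]
          apply ihj (index + 1) (by omega)
          rw [List.take_succ]
          intro hmem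
          rcases List.mem_append.mp hmem with h1 | h2
          · exact ht h1
          · rw [List.getElem?_eq_getElem h] at h2
            simp at h2
            exact hb h2.symm
      · rw [visualGo]
        simp only [dif_neg h]
        have heq : s.take index = s := List.take_of_length_le (by omega)
        rw [scanB_id (heq ▸ ht)]

theorem pre_shift {c : Char} {rest : List Char}
    (h : ∀ i ∈ List.range (c :: rest).length, (c :: rest)[i]? = some ']' →
      ((c :: rest)[i + 1]?.elim false (fun x => (PySem.Int.ofChars? [x]).isSome)) = true) :
    ∀ i ∈ List.range rest.length, rest[i]? = some ']' →
      (rest[i + 1]?.elim false (fun x => (PySem.Int.ofChars? [x]).isSome)) = true := by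
  intro i hi hbr
  have := h (i + 1) (by simp at hi ⊢; omega) (by simpa using hbr)
  simpa using this

theorem pre_imp_good : ∀ l : List Char,
    (∀ i ∈ List.range l.length, l[i]? = some ']' →
      (l[i + 1]?.elim false (fun c => (PySem.Int.ofChars? [c]).isSome)) = true) →
    goodB l = true := by
  intro l
  induction l with
  | nil => intro _; rfl
  | cons c rest ih =>
    intro h
    by_cases hc : c = ']'
    · subst hc
      have h0 := h 0 (by simp) (by simp)
      match rest with
      | [] => simp at h0
      | x :: t =>
        simp only [List.getElem?_cons_succ, List.getElem?_cons_zero, Option.elim_some] at h0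
        rw [goodB_bracket, Bool.and_eq_true]
        have ht := ih (pre_shift h)
        rw [goodB_cons_ne (digit_ne_bracket h0)] at ht
        exact ⟨h0, ht⟩
    · rw [goodB_cons_ne hc]
      exact ih (pre_shift h)

-- ===== VERDICT (by name: the statement is the Claim_ definition above) =====
theorem visual_spec : Claim_equal_visual := by
  intro value _ hpre
  unfold Spec_visual visual visual_alt
  unfold Pre_visual at hpre
  rw [visualGo_eq_scanB (value.toList.count ']') value.toList (pre_imp_good _ hpre) (le_refl _)
    value.toList.length 0 (by omega) (by simp)]
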